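-- pv_equiv track=rewrite | github.com/rinoale/react-vite | backend/lib/pipeline/line_split/line_processing.py | determine_enchant_slots
-- ===== SOURCE A (Python) =====
-- def determine_enchant_slots(classifications):
--     """Determine enchant slot order from classification structure.
--
--     Rules:
--       - 2 headers -> ['접두', '접미']
--       - 1 header with grey lines above -> ['접미'] (prefix slot empty)
--       - 1 header without grey above -> ['접두']
--       - 0 headers -> []
--
--     Args:
--         classifications: list of (group, bounds, line_type) tuples.
--
--     Returns:
--         list of slot labels in order.
--     """
--     n_headers = sum(1 for _, _, lt in classifications if lt == 'header')
--     if n_headers == 2: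
--         return ['접두', '접미']
--     elif n_headers == 1:
--         first_hdr_y = next(b['y'] for _, b, lt in classifications if lt == 'header')
--         grey_above = any(lt == 'grey' and b['y'] < first_hdr_y
--                          for _, b, lt in classifications)
--         return ['접미'] if grey_above else ['접두']
--     else:
--         return []
-- ===== SOURCE B (Python) =====
-- def determine_enchant_slots(classifications):
--     """Divide at the first header: recursively split off (before, header, after)
--     up to three times and decide by case analysis on what remains."""
--     before1, hdr1, after1 = _split_first_header(classifications)
--     if hdr1 is None:
--         return []
--     _, hdr2, after2 = _split_first_header(after1)
--     if hdr2 is None: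
--         hy = hdr1[1]['y']
--         if _grey_below(before1, hy) or _grey_below(after1, hy):
--             return ['접미']
--         return ['접두']
--     _, hdr3, _ = _split_first_header(after2)
--     return [] if hdr3 is not None else ['접두', '접미']
--
--
-- def _split_first_header(items):
--     for i, item in enumerate(items):
--         if item[2] == 'header':
--             return items[:i], item, items[i + 1:]
--     return items, None, []
--
--
-- def _grey_below(items, hy):
--     for _, b, lt in items:
--         if lt == 'grey' and b['y'] < hy:
--             return True
--     return False
-- ===== Notes on version B (the rewrite author's own statement) =====
-- stated objective: alternative
-- what changed: Replaces A's header count plus next/any filtered scans with a divide-at-first-header decomposition: a splitter extracts (before, first header, after) up to three times and the answer is decided by case analysis on which splits found a header, with a short-circuit grey scan only in the one-header case.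
import Mathlib
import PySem

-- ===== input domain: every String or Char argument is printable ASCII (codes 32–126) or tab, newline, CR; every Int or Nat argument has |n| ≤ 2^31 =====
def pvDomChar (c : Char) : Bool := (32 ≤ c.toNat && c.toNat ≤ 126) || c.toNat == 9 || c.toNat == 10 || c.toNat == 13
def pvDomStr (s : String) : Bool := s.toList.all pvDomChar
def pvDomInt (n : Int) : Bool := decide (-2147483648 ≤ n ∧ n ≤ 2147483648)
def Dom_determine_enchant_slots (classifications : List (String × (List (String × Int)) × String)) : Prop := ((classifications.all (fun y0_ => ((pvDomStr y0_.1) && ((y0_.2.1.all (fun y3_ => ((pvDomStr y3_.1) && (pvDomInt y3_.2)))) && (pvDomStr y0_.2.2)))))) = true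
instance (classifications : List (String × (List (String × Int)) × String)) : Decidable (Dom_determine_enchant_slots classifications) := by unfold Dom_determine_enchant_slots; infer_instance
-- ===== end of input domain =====

-- B replaces A's counting + filtered scans with a divide-at-first-header decomposition (objective: alternative; same O(n) cost).

-- shared primitive: Python's b['y'] on an association list (first match), as Option
def pvLookupY (b : List (String × Int)) : Option Int :=
  (b.find? (fun p => p.1 == "y")).map (·.2)

-- ===== PORT A =====
def determine_enchant_slots (classifications : List (String × (List (String × Int)) × String)) : List String :=
  let n_headers := classifications.countP (fun t => t.2.2 == "header")
  if n_headers = 2 then ["접두", "접미"]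
  else if n_headers = 1 then
    let first_hdr_y :=
      match classifications.find? (fun t => t.2.2 == "header") with
      | some t => (pvLookupY t.2.1).getD 0   -- Pre_ guarantees some; 0 is never used
      | none => 0
    let grey_above := classifications.any
      (fun t => t.2.2 == "grey" && decide ((pvLookupY t.2.1).getD 0 < first_hdr_y))
    if grey_above then ["접미"] else ["접두"]
  else []

-- ===== PORT B =====
-- _split_first_header: (items before the first header, the first header if any, items after it)
def pvSplitHdr (items : List (String × (List (String × Int)) × String)) :
    List (String × (List (String × Int)) × String) ×
    Option (String × (List (String × Int)) × String) ×
    List (String × (List (String × Int)) × String) :=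
  match items with
  | [] => ([], none, [])
  | c :: rest =>
    if c.2.2 == "header" then ([], some c, rest)
    else
      let r := pvSplitHdr rest
      (c :: r.1, r.2.1, r.2.2)

-- _grey_below: short-circuit scan for a grey line with y below hy
def pvGreyBelow (items : List (String × (List (String × Int)) × String)) (hy : Int) : Bool :=
  match items with
  | [] => false
  | c :: rest =>
    (c.2.2 == "grey" && decide ((pvLookupY c.2.1).getD 0 < hy)) || pvGreyBelow rest hy

def determine_enchant_slots_alt (classifications : List (String × (List (String × Int)) × String)) : List String :=
  let s1 := pvSplitHdr classifications
  match s1.2.1 with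
  | none => []
  | some hdr1 =>
    let s2 := pvSplitHdr s1.2.2
    match s2.2.1 with
    | none =>
      let hy := (pvLookupY hdr1.2.1).getD 0
      if pvGreyBelow s1.1 hy || pvGreyBelow s1.2.2 hy then ["접미"] else ["접두"]
    | some _ =>
      let s3 := pvSplitHdr s2.2.2
      match s3.2.1 with
      | none => ["접두", "접미"]
      | some _ => []

-- ===== PRECONDITION & SPEC =====
-- Pre_ excludes inputs on which Python A may raise KeyError: when there is exactly one
-- header, every header's and every grey line's bounds dict must contain key 'y'
-- (slightly broader than the exact raise set because Python's any() short-circuits;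
-- see claim.json "cites" for an excluded input on which both still return).
def Pre_determine_enchant_slots (classifications : List (String × (List (String × Int)) × String)) : Prop :=
  classifications.countP (fun t => t.2.2 == "header") = 1 →
    ∀ t ∈ classifications, (t.2.2 = "header" ∨ t.2.2 = "grey") → (pvLookupY t.2.1).isSome
instance (classifications : List (String × (List (String × Int)) × String)) : Decidable (Pre_determine_enchant_slots classifications) := by unfold Pre_determine_enchant_slots; infer_instance

def pvWitness_determine_enchant_slots : (List (String × (List (String × Int)) × String)) :=
  [("g", [("y", 3)], "header"), ("g", [("y", 1)], "grey"), ("g", [], "text")]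

def Spec_determine_enchant_slots (classifications : List (String × (List (String × Int)) × String)) (out : List String) : Prop := out = determine_enchant_slots_alt classifications
instance (classifications : List (String × (List (String × Int)) × String)) (out : List String) : Decidable (Spec_determine_enchant_slots classifications out) := by unfold Spec_determine_enchant_slots; infer_instance

-- ===== CLAIM (what is proved, stated in full; the proofs are below) =====
def Claim_equal_determine_enchant_slots : Prop := ∀ (classifications : List (String × (List (String × Int)) × String)), Dom_determine_enchant_slots classifications → Pre_determine_enchant_slots classifications → Spec_determine_enchant_slots classifications (determine_enchant_slots classifications)

-- ===== LEMMAS AND PROOFS =====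

-- structure of a failed split: no header anywhere
theorem pvSplitHdr_none (cs : List (String × (List (String × Int)) × String))
    (h : (pvSplitHdr cs).2.1 = none) :
    ∀ t ∈ cs, (t.2.2 == "header") = false := by
  induction cs with
  | nil => simp
  | cons c rest ih =>
    intro t ht
    simp only [pvSplitHdr] at h
    by_cases hc : c.2.2 == "header"
    · rw [if_pos hc] at h; simp at h
    · rw [if_neg hc] at h
      rcases List.mem_cons.mp ht with rfl | ht
      · simpa using hc
      · exact ih h t ht

-- structure of a successful split
theorem pvSplitHdr_some (cs : List (String × (List (String × Int)) × String))
    (h : (pvSplitHdr cs).2.1.isSome) :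
    ∃ hd, (pvSplitHdr cs).2.1 = some hd ∧
      cs = (pvSplitHdr cs).1 ++ hd :: (pvSplitHdr cs).2.2 ∧
      (∀ t ∈ (pvSplitHdr cs).1, (t.2.2 == "header") = false) ∧
      (hd.2.2 == "header") = true := by
  induction cs with
  | nil => simp [pvSplitHdr] at h
  | cons c rest ih =>
    by_cases hc : c.2.2 == "header"
    · exact ⟨c, by simp [pvSplitHdr, hc]⟩
    · simp only [pvSplitHdr, if_neg hc] at h ⊢
      obtain ⟨hd, h1, h2, h3, h4⟩ := ih h
      exact ⟨hd, h1, by rw [List.cons_append, ← h2], by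
        intro t ht
        rcases List.mem_cons.mp ht with rfl | ht
        · simpa using hc
        · exact h3 t ht, h4⟩

-- grey_below is the any-scan restricted to its list
theorem pvGreyBelow_eq_any (items : List (String × (List (String × Int)) × String)) (hy : Int) :
    pvGreyBelow items hy
      = items.any (fun t => t.2.2 == "grey" && decide ((pvLookupY t.2.1).getD 0 < hy)) := by
  induction items with
  | nil => rfl
  | cons c rest ih => simp [pvGreyBelow, ih]

-- a list with no headers contributes no header count
theorem pvCountP_zero (l : List (String × (List (String × Int)) × String))
    (h : ∀ t ∈ l, (t.2.2 == "header") = false) :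
    l.countP (fun t => t.2.2 == "header") = 0 := by
  rw [List.countP_eq_zero]; intro t ht; simp [h t ht]

-- counting across one extracted header
theorem pvCount_split (b : List (String × (List (String × Int)) × String))
    (hd : String × (List (String × Int)) × String)
    (a : List (String × (List (String × Int)) × String))
    (hb : ∀ t ∈ b, (t.2.2 == "header") = false)
    (hh : (hd.2.2 == "header") = true) :
    (b ++ hd :: a).countP (fun t => t.2.2 == "header")
      = a.countP (fun t => t.2.2 == "header") + 1 := by
  rw [List.countP_append, List.countP_cons, pvCountP_zero b hb, hh]
  simp

-- find? over a headerless prefix finds the extracted header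
theorem pvFind_skip (b : List (String × (List (String × Int)) × String))
    (hb : ∀ t ∈ b, (t.2.2 == "header") = false)
    (hd : String × (List (String × Int)) × String)
    (a : List (String × (List (String × Int)) × String))
    (hh : (hd.2.2 == "header") = true) :
    (b ++ hd :: a).find? (fun t => t.2.2 == "header") = some hd := by
  rw [List.find?_append]
  have hn : b.find? (fun t => t.2.2 == "header") = none := by
    rw [List.find?_eq_none]; intro t ht; simp [hb t ht]
  rw [hn]
  simp [List.find?, hh]

-- ports agree on every input (the decision structure is equivalent)
theorem pv_ports_eq (cs : List (String × (List (String × Int)) × String)) :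
    determine_enchant_slots cs = determine_enchant_slots_alt cs := by
  rcases h1 : (pvSplitHdr cs).2.1 with _ | hd1
  · -- no header at all: count = 0
    have hz := pvCountP_zero cs (pvSplitHdr_none cs h1)
    simp [determine_enchant_slots, determine_enchant_slots_alt, h1, hz]
  · obtain ⟨hd, e1, e2, e3, e4⟩ := pvSplitHdr_some cs (by rw [h1]; rfl)
    rw [h1] at e1; cases e1
    rcases h2 : (pvSplitHdr (pvSplitHdr cs).2.2).2.1 with _ | hd2
    · -- exactly one header
      have hz := pvCountP_zero _ (pvSplitHdr_none _ h2)
      have hc : cs.countP (fun t => t.2.2 == "header") = 1 := by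
        rw [e2, pvCount_split _ _ _ e3 e4, hz]
      have hf : cs.find? (fun t => t.2.2 == "header") = some hd1 := by
        conv_lhs => rw [e2]
        exact pvFind_skip _ e3 _ _ e4
      have ha : cs.any (fun t => t.2.2 == "grey" &&
            decide ((pvLookupY t.2.1).getD 0 < (pvLookupY hd1.2.1).getD 0))
          = (pvGreyBelow (pvSplitHdr cs).1 ((pvLookupY hd1.2.1).getD 0)
             || pvGreyBelow (pvSplitHdr cs).2.2 ((pvLookupY hd1.2.1).getD 0)) := by
        conv_lhs => rw [e2]
        rw [List.any_append, List.any_cons, pvGreyBelow_eq_any, pvGreyBelow_eq_any]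
        have hng : (hd1.2.2 == "grey") = false := by
          have := beq_iff_eq.mp e4; simp [this]
        simp [hng]
      simp only [determine_enchant_slots, determine_enchant_slots_alt, hc, hf, h1, h2, ha]
      simp
    · -- at least two headers
      obtain ⟨hd', e1', e2', e3', e4'⟩ := pvSplitHdr_some (pvSplitHdr cs).2.2 (by rw [h2]; rfl)
      rw [h2] at e1'; cases e1'
      rcases h3 : (pvSplitHdr (pvSplitHdr (pvSplitHdr cs).2.2).2.2).2.1 with _ | hd3
      · -- exactly two headers
        have hz := pvCountP_zero _ (pvSplitHdr_none _ h3)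
        have hc : cs.countP (fun t => t.2.2 == "header") = 2 := by
          conv_lhs => rw [e2, pvCount_split _ _ _ e3 e4, e2',
            pvCount_split _ _ _ e3' e4', hz]
        simp only [determine_enchant_slots, determine_enchant_slots_alt, hc, h1, h2, h3]
        simp
      · -- three or more headers
        obtain ⟨hd'', e1'', e2'', e3'', e4''⟩ :=
          pvSplitHdr_some (pvSplitHdr (pvSplitHdr cs).2.2).2.2 (by rw [h3]; rfl)
        rw [h3] at e1''; cases e1''
        have hc : cs.countP (fun t => t.2.2 == "header") =
            ((pvSplitHdr (pvSplitHdr (pvSplitHdr cs).2.2).2.2).2.2).countP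
              (fun t => t.2.2 == "header") + 3 := by
          conv_lhs => rw [e2, pvCount_split _ _ _ e3 e4, e2',
            pvCount_split _ _ _ e3' e4', e2'', pvCount_split _ _ _ e3'' e4'']
        have n2 : ((pvSplitHdr (pvSplitHdr (pvSplitHdr cs).2.2).2.2).2.2).countP
            (fun t => t.2.2 == "header") + 3 ≠ 2 := by omega
        have n1 : ((pvSplitHdr (pvSplitHdr (pvSplitHdr cs).2.2).2.2).2.2).countP
            (fun t => t.2.2 == "header") + 3 ≠ 1 := by omega
        simp only [determine_enchant_slots, determine_enchant_slots_alt, hc, h1, h2, h3]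
        simp [n1, n2]

-- ===== VERDICT (by name: the statement is the Claim_ definition above) =====
theorem determine_enchant_slots_spec : Claim_equal_determine_enchant_slots := by
  intro cs _ _
  unfold Spec_determine_enchant_slots
  exact pv_ports_eq cs
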